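-- pv_equiv track=rewrite | github.com/ehghks021203/CodingTest | Baekjoon/Class2/S4_10816.py | solution
-- ===== SOURCE A (Python) =====
-- def solution(cards: list, targets: list) -> list:
-- 	counts = {}
-- 	result = []
-- 	for card in cards:
-- 		if not card in counts: counts[card] = 1
-- 		else: counts[card] += 1
-- 	for target in targets:
-- 		if not target in counts: result.append(0)
-- 		else: result.append(counts[target])
-- 	return result
-- ===== SOURCE B (Python) =====
-- import bisect
--
--
-- def solution(cards: list, targets: list) -> list:
--     s = sorted(cards)
--     return [bisect.bisect_right(s, t) - bisect.bisect_left(s, t) for t in targets]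
-- ===== Notes on version B (the rewrite author's own statement) =====
-- stated objective: alternative
-- what changed: B replaces A's hash-map counting pass with a sorted copy of cards and answers each target by two binary searches (bisect_right - bisect_left).
import Mathlib
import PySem

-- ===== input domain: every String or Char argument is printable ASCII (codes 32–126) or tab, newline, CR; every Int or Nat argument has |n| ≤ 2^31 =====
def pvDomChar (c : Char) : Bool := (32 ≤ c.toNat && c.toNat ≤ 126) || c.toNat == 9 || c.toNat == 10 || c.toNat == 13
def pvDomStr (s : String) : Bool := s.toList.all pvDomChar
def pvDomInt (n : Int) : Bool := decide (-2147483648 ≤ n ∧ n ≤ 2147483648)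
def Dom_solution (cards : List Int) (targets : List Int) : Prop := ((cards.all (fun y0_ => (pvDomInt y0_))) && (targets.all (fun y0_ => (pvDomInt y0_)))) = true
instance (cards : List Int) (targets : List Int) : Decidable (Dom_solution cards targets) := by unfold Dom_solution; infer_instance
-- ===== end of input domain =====

-- B answers each count query with two binary searches on a sorted copy of cards instead of A's hash-count pass; alternative algorithm, return values proved equal.


-- ===== PORT A =====
def solution (cards : List Int) (targets : List Int) : List Int :=
  let counts : PySem.Dict Int Int :=
    cards.foldl (fun d card =>
      if d.contains card = false then d.insert card 1
      else d.insert card (d.getD card 0 + 1)) PySem.Dict.empty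
  targets.foldl (fun result target =>
    if counts.contains target = false then result ++ [0]
    else result ++ [counts.getD target 0]) []

-- ===== PORT B =====
def solution_alt (cards : List Int) (targets : List Int) : List Int :=
  let s := PySem.List.sorted cards (fun x => x) false
  targets.map (fun t =>
    (PySem.List.bisectRight s t : Int) - (PySem.List.bisectLeft s t : Int))

-- ===== PRECONDITION & SPEC =====
def Spec_solution (cards : List Int) (targets : List Int) (out : List Int) : Prop := out = solution_alt cards targets
instance (cards : List Int) (targets : List Int) (out : List Int) : Decidable (Spec_solution cards targets out) := by unfold Spec_solution; infer_instance

-- ===== CLAIM (what is proved, stated in full; the proofs are below) =====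
def Claim_equal_solution : Prop := ∀ (cards : List Int) (targets : List Int), Dom_solution cards targets → Spec_solution cards targets (solution cards targets)

-- ===== LEMMAS AND PROOFS =====

-- a dict lookup with default on an absent key returns the default
lemma getD_of_not_contains (d : PySem.Dict Int Int) (k : Int)
    (h : d.contains k = false) : d.getD k 0 = 0 := by
  have hnone : d.get? k = none := by
    have := PySem.Dict.contains_eq_isSome_get? d k
    rw [h] at this
    exact Option.not_isSome_iff_eq_none.mp (by simp [← this])
  simp [PySem.Dict.getD, hnone]

-- A's first loop builds exactly Counter(cards)
lemma countsA_eq_counter (cards : List Int) :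
    cards.foldl (fun d card =>
      if d.contains card = false then d.insert card 1
      else d.insert card (d.getD card 0 + 1)) PySem.Dict.empty
    = PySem.Dict.counter cards := by
  have hfun : (fun (d : PySem.Dict Int Int) card =>
      if d.contains card = false then d.insert card 1
      else d.insert card (d.getD card 0 + 1))
      = fun d card => d.insert card (d.getD card 0 + 1) := by
    funext d card
    by_cases h : d.contains card = false
    · simp [h, getD_of_not_contains d card h]
    · simp [h]
  rw [hfun, PySem.Dict.foldl_insert_getD_add_one_eq_counter]

-- on a (≤-)sorted list, bisectLeft ≤ bisectRight and their difference counts the occurrences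
lemma bisect_count (s : List Int) (t : Int) (hs : s.Pairwise (· ≤ ·)) :
    PySem.List.bisectLeft s t ≤ PySem.List.bisectRight s t ∧
    s.count t = PySem.List.bisectRight s t - PySem.List.bisectLeft s t := by
  obtain ⟨hbllen, hbl1, hbl2⟩ := PySem.List.bisectLeft_spec s t hs
  obtain ⟨hbrlen, hbr1, hbr2⟩ := PySem.List.bisectRight_spec s t hs
  set bl := PySem.List.bisectLeft s t with hbldef
  set br := PySem.List.bisectRight s t with hbrdef
  have hle : bl ≤ br := by
    by_contra hc
    have hc : br < bl := Nat.lt_of_not_le hc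
    have hbrlt : br < s.length := lt_of_lt_of_le hc hbllen
    have h1 : s[br] < t := hbl1 br hbrlt hc
    have h2 : t < s[br] := hbr2 br hbrlt le_rfl
    omega
  refine ⟨hle, ?_⟩
  have hdecomp : s = s.take bl ++ ((s.drop bl).take (br - bl) ++ s.drop br) := by
    have h1 : (s.drop bl).drop (br - bl) = s.drop br := by
      rw [List.drop_drop]
      congr 1
      omega
    conv_lhs => rw [← List.take_append_drop bl s, ← List.take_append_drop (br - bl) (s.drop bl), h1]
  have hc1 : (s.take bl).count t = 0 := by
    rw [List.count_eq_zero]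
    intro hmem
    obtain ⟨j, hj, hval⟩ := List.mem_iff_getElem.mp hmem
    have hjbl : j < bl := by
      have := hj; rw [List.length_take] at this; omega
    have hjs : j < s.length := by
      have := hj; rw [List.length_take] at this; omega
    have := hbl1 j hjs hjbl
    rw [List.getElem_take] at hval
    omega
  have hc3 : (s.drop br).count t = 0 := by
    rw [List.count_eq_zero]
    intro hmem
    obtain ⟨j, hj, hval⟩ := List.mem_iff_getElem.mp hmem
    have hjs : br + j < s.length := by
      have := hj; rw [List.length_drop] at this; omega
    have := hbr2 (br + j) hjs (Nat.le_add_right br j)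
    rw [List.getElem_drop] at hval
    omega
  have hmidlen : ((s.drop bl).take (br - bl)).length = br - bl := by
    rw [List.length_take, List.length_drop]; omega
  have hc2 : ((s.drop bl).take (br - bl)).count t = br - bl := by
    have hall : ∀ b ∈ (s.drop bl).take (br - bl), t = b := ?_
    · rw [List.count_eq_length.mpr hall, hmidlen]
    intro b hb
    obtain ⟨j, hj, hval⟩ := List.mem_iff_getElem.mp hb
    have hjlt : j < br - bl := by rw [hmidlen] at hj; exact hj
    have hjs : bl + j < s.length := by
      have hln : bl + j < br := by omega
      omega
    have h1 : s[bl + j] ≤ t := hbr1 (bl + j) hjs (by omega)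
    have h2 : t ≤ s[bl + j] := hbl2 (bl + j) hjs (Nat.le_add_right bl j)
    rw [List.getElem_take, List.getElem_drop] at hval
    omega
  calc s.count t = (s.take bl ++ ((s.drop bl).take (br - bl) ++ s.drop br)).count t := by
        rw [← hdecomp]
    _ = (s.take bl).count t + (((s.drop bl).take (br - bl)).count t + (s.drop br).count t) := by
        rw [List.count_append, List.count_append]
    _ = br - bl := by rw [hc1, hc2, hc3]; omega

-- each element of A's answer list is the multiplicity of the target in cards
lemma answerA_eq_count (cards : List Int) (t : Int) :
    (if (PySem.Dict.counter cards).contains t = false then (0 : Int)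
     else (PySem.Dict.counter cards).getD t 0) = (cards.count t : Int) := by
  by_cases h : (PySem.Dict.counter cards).contains t = false
  · rw [if_pos h]
    rw [PySem.Dict.contains_counter] at h
    have : t ∉ cards := by
      intro hmem
      rw [List.contains_eq_mem] at h
      simp [hmem] at h
    rw [List.count_eq_zero.mpr this]
    simp
  · rw [if_neg h, PySem.Dict.getD_counter]

-- ===== VERDICT (by name: the statement is the Claim_ definition above) =====
theorem solution_spec : Claim_equal_solution := by
  intro cards targets _
  unfold Spec_solution solution solution_alt
  simp only
  rw [countsA_eq_counter]
  have hloop : ∀ (acc : List Int),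
      targets.foldl (fun result target =>
        if (PySem.Dict.counter cards).contains target = false then result ++ [0]
        else result ++ [(PySem.Dict.counter cards).getD target 0]) acc
      = acc ++ targets.map (fun t =>
          if (PySem.Dict.counter cards).contains t = false then (0 : Int)
          else (PySem.Dict.counter cards).getD t 0) := by
    intro acc
    have hfun : (fun (result : List Int) target =>
        if (PySem.Dict.counter cards).contains target = false then result ++ [0]
        else result ++ [(PySem.Dict.counter cards).getD target 0])
        = fun result target => result ++ [if (PySem.Dict.counter cards).contains target = false then (0 : Int)
            else (PySem.Dict.counter cards).getD target 0] := by
      funext result target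
      by_cases h : (PySem.Dict.counter cards).contains target = false <;> simp [h]
    rw [hfun, PySem.List.foldl_append_singleton_eq_map]
  rw [hloop []]
  simp only [List.nil_append]
  apply List.map_congr_left
  intro t _
  rw [answerA_eq_count]
  have hs : (PySem.List.sorted cards (fun x => x) false).Pairwise (· ≤ ·) := by
    have := PySem.List.sorted_pairwise cards (fun x => x)
    simpa using this
  obtain ⟨hle, hcount⟩ := bisect_count (PySem.List.sorted cards (fun x => x) false) t hs
  have hperm : (PySem.List.sorted cards (fun x => x) false).Perm cards :=
    PySem.List.sorted_perm cards (fun x => x) false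
  rw [← hperm.count_eq, hcount]
  omega
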